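-- pv_equiv track=rewrite | github.com/NVIDIA-NeMo/Automodel | nemo_automodel/_transformers/tokenization/nemo_auto_tokenizer.py | _remap_system_role
-- ===== SOURCE A (Python) =====
-- def _remap_system_role(conversation):
--     """Merge a single system message into the first user message.
--
--     If the template's Jinja raises ``TemplateError("System role not supported")``,
--     this helper folds the system content into the first ``user`` turn so the
--     template can render without error.
--
--     Raises ``ValueError`` when more than one system message is present (ambiguous).
--     """
--     system_msgs = [m for m in conversation if isinstance(m, dict) and m.get("role") == "system"]
--     if len(system_msgs) > 1:
--         raise ValueError("System role appeared in multiple messages. Only a single system message is supported.")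
--
--     system_content = system_msgs[0].get("content", "")
--     remapped = []
--     merged = False
--     for m in conversation:
--         if isinstance(m, dict) and m.get("role") == "system":
--             continue
--         if not merged and isinstance(m, dict) and m.get("role") == "user":
--             remapped.append({**m, "content": f"{system_content}\n{m['content']}"})
--             merged = True
--         else:
--             remapped.append(m)
--     if not merged:
--         remapped.insert(0, {"role": "user", "content": system_content})
--     return remapped
-- ===== SOURCE B (Python) =====
-- def _remap_system_role(conversation):
--     """Merge a single system message into the first user message.
--
--     Works in the opposite stage order from the flag-driven pass: first PATCH the
--     conversation by splicing the merged user turn in at the located index (or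
--     prepending a synthetic user turn when there is no user), and only THEN drop
--     the system messages with a final comprehension.  Correct because patching
--     never changes which messages are system messages.
--     """
--     system_msgs = [m for m in conversation if isinstance(m, dict) and m.get("role") == "system"]
--     if len(system_msgs) > 1:
--         raise ValueError("System role appeared in multiple messages. Only a single system message is supported.")
--
--     system_content = system_msgs[0].get("content", "")
--     idx = next((i for i, m in enumerate(conversation)
--                 if isinstance(m, dict) and m.get("role") == "user"), None)
--     if idx is None:
--         patched = [{"role": "user", "content": system_content}] + list(conversation)
--     else:
--         u = conversation[idx]
--         merged = {**u, "content": f"{system_content}\n{u['content']}"}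
--         patched = conversation[:idx] + [merged] + conversation[idx + 1:]
--     return [m for m in patched if not (isinstance(m, dict) and m.get("role") == "system")]
-- ===== Notes on version B (the rewrite author's own statement) =====
-- stated objective: alternative
-- what changed: Reverses the stage order and the mechanism: instead of A's single flag-driven pass that drops systems while merging, B first locates the first user turn by index and splices the merged turn into the ORIGINAL conversation with slice concatenation (or prepends a synthetic user turn), and only afterwards filters the system messages out.
import Mathlib
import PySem

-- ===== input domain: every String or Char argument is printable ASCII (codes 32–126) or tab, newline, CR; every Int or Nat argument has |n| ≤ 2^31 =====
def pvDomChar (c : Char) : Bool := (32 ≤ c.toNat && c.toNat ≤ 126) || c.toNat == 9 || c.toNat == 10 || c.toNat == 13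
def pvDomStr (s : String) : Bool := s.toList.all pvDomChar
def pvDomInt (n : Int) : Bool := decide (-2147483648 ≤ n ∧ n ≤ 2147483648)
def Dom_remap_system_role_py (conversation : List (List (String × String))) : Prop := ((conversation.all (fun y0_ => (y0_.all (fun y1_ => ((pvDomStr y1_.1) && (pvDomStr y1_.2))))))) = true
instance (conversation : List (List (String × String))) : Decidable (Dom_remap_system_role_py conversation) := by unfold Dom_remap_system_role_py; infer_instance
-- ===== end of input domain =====

-- B swaps the stage order: locate the first user turn by index and splice the merged turn
-- into the original conversation (slice concatenation), then filter system messages out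
-- (objective: alternative mechanism; return value only, same raises).
-- Messages are Python dicts: each List (String × String) is read through PySem.Dict.ofList
-- (duplicate keys collapse exactly as dict(pairs) does) and every output message is a dict's items.

-- ===== PORT A =====
-- A's loop: foldl over the conversation with state (remapped, merged).
def remap_system_role_py (conversation : List (List (String × String))) : List (List (String × String)) :=
  let system_msgs := conversation.filter (fun m => (PySem.Dict.ofList m).get? "role" == some "system")
  if 1 < system_msgs.length then []  -- Python raises ValueError here (excluded by Pre_)
  else
    -- system_msgs[0] raises IndexError when there is no system message (excluded by Pre_)
    let system_content := ((PySem.Dict.ofList (system_msgs.headD [])).get? "content").getD ""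
    let st := conversation.foldl
      (fun (st : List (List (String × String)) × Bool) m =>
        let d := PySem.Dict.ofList m
        if d.get? "role" == some "system" then st
        else if !st.2 && (d.get? "role" == some "user") then
          -- m['content'] raises KeyError when absent (excluded by Pre_); getD "" is unreached inside Pre_
          (st.1 ++ [(d.insert "content" (system_content ++ "\n" ++ (d.get? "content").getD "")).items], true)
        else (st.1 ++ [d.items], st.2))
      ([], false)
    if !st.2 then [("role", "user"), ("content", system_content)] :: st.1 else st.1

-- ===== PORT B =====
-- next((i for i, m in enumerate(conversation) if m.get("role") == "user"), None) → findIdx?;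
-- conversation[:idx] / [idx] / [idx+1:] → take / getD / drop (idx is a nonnegative in-range index).
def remap_system_role_py_alt (conversation : List (List (String × String))) : List (List (String × String)) :=
  let system_msgs := conversation.filter (fun m => (PySem.Dict.ofList m).get? "role" == some "system")
  if 1 < system_msgs.length then []  -- Python raises ValueError here (excluded by Pre_)
  else
    let sc := ((PySem.Dict.ofList (system_msgs.headD [])).get? "content").getD ""
    let patched : List (PySem.Dict String String) :=
      match conversation.findIdx? (fun m => (PySem.Dict.ofList m).get? "role" == some "user") with
      | none => PySem.Dict.ofList [("role", "user"), ("content", sc)] :: conversation.map PySem.Dict.ofList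
      | some i =>
        let u := PySem.Dict.ofList (conversation.getD i [])
        (conversation.take i).map PySem.Dict.ofList
          ++ [u.insert "content" (sc ++ "\n" ++ (u.get? "content").getD "")]
          ++ (conversation.drop (i + 1)).map PySem.Dict.ofList
    (patched.filter (fun d => !(d.get? "role" == some "system"))).map PySem.Dict.items

-- ===== PRECONDITION & SPEC =====
-- Pre_ excludes exactly the inputs where A raises: ValueError (more than one system message),
-- IndexError (no system message), KeyError (first user message lacks a "content" key).
def Pre_remap_system_role_py (conversation : List (List (String × String))) : Prop :=
  conversation.countP (fun m => (PySem.Dict.ofList m).get? "role" == some "system") = 1 ∧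
  ((conversation.find? (fun m => (PySem.Dict.ofList m).get? "role" == some "user")).all
      (fun mu => (PySem.Dict.ofList mu).contains "content")) = true
instance (conversation : List (List (String × String))) : Decidable (Pre_remap_system_role_py conversation) := by unfold Pre_remap_system_role_py; infer_instance

def pvWitness_remap_system_role_py : (List (List (String × String))) :=
  [[("role", "system"), ("content", "be brief")], [("role", "user"), ("content", "hi")]]

def Spec_remap_system_role_py (conversation : List (List (String × String))) (out : List (List (String × String))) : Prop := out = remap_system_role_py_alt conversation
instance (conversation : List (List (String × String))) (out : List (List (String × String))) : Decidable (Spec_remap_system_role_py conversation out) := by unfold Spec_remap_system_role_py; infer_instance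

-- ===== CLAIM (what is proved, stated in full; the proofs are below) =====
def Claim_equal_remap_system_role_py : Prop := ∀ (conversation : List (List (String × String))), Dom_remap_system_role_py conversation → Pre_remap_system_role_py conversation → Spec_remap_system_role_py conversation (remap_system_role_py conversation)

-- ===== LEMMAS AND PROOFS =====

-- abbreviation for A's loop body, used only in the proofs below
def pvStepA (sc : String) (st : List (List (String × String)) × Bool) (m : List (String × String)) :
    List (List (String × String)) × Bool :=
  let d := PySem.Dict.ofList m
  if d.get? "role" == some "system" then st
  else if !st.2 && (d.get? "role" == some "user") then
    (st.1 ++ [(d.insert "content" (sc ++ "\n" ++ (d.get? "content").getD "")).items], true)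
  else (st.1 ++ [d.items], st.2)

-- the kept (non-system) messages, normalized to items
def pvKeep (xs : List (List (String × String))) : List (List (String × String)) :=
  (xs.filter (fun m => !((PySem.Dict.ofList m).get? "role" == some "system"))).map
    (fun m => (PySem.Dict.ofList m).items)

def pvMerged (sc : String) (m : List (String × String)) : List (String × String) :=
  ((PySem.Dict.ofList m).insert "content"
    (sc ++ "\n" ++ ((PySem.Dict.ofList m).get? "content").getD "")).items

lemma pvLoopA_true (sc : String) (xs : List (List (String × String))) (acc : List (List (String × String))) :
    xs.foldl (pvStepA sc) (acc, true) = (acc ++ pvKeep xs, true) := by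
  induction xs generalizing acc with
  | nil => simp [pvKeep]
  | cons m rest ih =>
    simp only [List.foldl_cons, pvStepA, pvKeep, List.filter_cons]
    by_cases h : ((PySem.Dict.ofList m).get? "role" == some "system") = true
    · simpa [h, pvKeep] using ih acc
    · simpa [h, pvKeep] using ih (acc ++ [(PySem.Dict.ofList m).items])

lemma pvLoopA_false (sc : String) (xs : List (List (String × String))) (acc : List (List (String × String))) :
    xs.foldl (pvStepA sc) (acc, false) =
      match xs.findIdx? (fun m => (PySem.Dict.ofList m).get? "role" == some "user") with
      | none => (acc ++ pvKeep xs, false)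
      | some i =>
          (acc ++ pvKeep (xs.take i) ++ [pvMerged sc (xs.getD i [])] ++ pvKeep (xs.drop (i + 1)), true) := by
  induction xs generalizing acc with
  | nil => simp [pvKeep]
  | cons m rest ih =>
    by_cases hu : ((PySem.Dict.ofList m).get? "role" == some "user") = true
    · have hs : ((PySem.Dict.ofList m).get? "role" == some "system") = false := by
        cases h' : (PySem.Dict.ofList m).get? "role" with
        | none => simp [h'] at hu
        | some r => simp [h'] at hu ⊢; simp [hu]
      have hstep : pvStepA sc (acc, false) m = (acc ++ [pvMerged sc m], true) := by
        simp [pvStepA, hs, hu, pvMerged]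
      simp [List.findIdx?_cons, hu, hstep, pvLoopA_true, pvKeep]
    · have hfind : (m :: rest).findIdx? (fun m => (PySem.Dict.ofList m).get? "role" == some "user")
          = (rest.findIdx? (fun m => (PySem.Dict.ofList m).get? "role" == some "user")).map (· + 1) := by
        simp [List.findIdx?_cons, hu]
      by_cases hs : ((PySem.Dict.ofList m).get? "role" == some "system") = true
      · have hstep : pvStepA sc (acc, false) m = (acc, false) := by simp [pvStepA, hs]
        rw [List.foldl_cons, hstep, ih, hfind]
        cases rest.findIdx? (fun m => (PySem.Dict.ofList m).get? "role" == some "user") with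
        | none => simp [pvKeep, hs]
        | some i => simp [pvKeep, hs]
      · have hstep : pvStepA sc (acc, false) m = (acc ++ [(PySem.Dict.ofList m).items], false) := by
          simp [pvStepA, hs, hu]
        rw [List.foldl_cons, hstep, ih, hfind]
        cases rest.findIdx? (fun m => (PySem.Dict.ofList m).get? "role" == some "user") with
        | none => simp [pvKeep, hs]
        | some i => simp [pvKeep, hs]

lemma pvFindIdx?_getD {p : List (String × String) → Bool} {xs : List (List (String × String))} {i : Nat}
    (h : xs.findIdx? p = some i) : p (xs.getD i []) = true := by
  induction xs generalizing i with
  | nil => simp at h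
  | cons m rest ih =>
    rw [List.findIdx?_cons] at h
    by_cases hp : p m = true
    · simp [hp] at h; subst h; simpa using hp
    · simp [hp] at h
      obtain ⟨j, hj, rfl⟩ := h
      simpa using ih hj

lemma pvMapTake {α β : Type} (f : α → β) (n : Nat) (l : List α) :
    (l.map f).take n = (l.take n).map f := by
  induction l generalizing n with
  | nil => simp
  | cons a l ih =>
    cases n with
    | zero => rfl
    | succ n => simp only [List.map_cons, List.take_succ_cons]; rw [ih]

lemma pvMapDrop {α β : Type} (f : α → β) (n : Nat) (l : List α) :
    (l.map f).drop n = (l.drop n).map f := by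
  induction l generalizing n with
  | nil => simp
  | cons a l ih =>
    cases n with
    | zero => rfl
    | succ n => simp only [List.map_cons, List.drop_succ_cons]; rw [ih]

-- B's filter-after-patch collapses to pvKeep segments
lemma pvKeep_map_filter (xs : List (List (String × String))) :
    ((xs.map PySem.Dict.ofList).filter (fun d => !(d.get? "role" == some "system"))).map PySem.Dict.items
      = pvKeep xs := by
  induction xs with
  | nil => rfl
  | cons m rest ih =>
    by_cases h : ((PySem.Dict.ofList m).get? "role" == some "system") = true
    · simp only [pvKeep, List.map_cons, List.filter_cons] at *
      simp [h, ih]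
    · simp only [pvKeep, List.map_cons, List.filter_cons] at *
      simp [h, ih]

-- ===== VERDICT (by name: the statement is the Claim_ definition above) =====
theorem remap_system_role_py_spec : Claim_equal_remap_system_role_py := by
  intro conversation _ _
  unfold Spec_remap_system_role_py remap_system_role_py remap_system_role_py_alt
  simp only []
  by_cases h : 1 < (conversation.filter (fun m => (PySem.Dict.ofList m).get? "role" == some "system")).length
  · simp [h]
  · simp only [h, if_false]
    set sc := (((PySem.Dict.ofList ((conversation.filter (fun m => (PySem.Dict.ofList m).get? "role" == some "system")).headD [])).get? "content").getD "") with hsc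
    rw [show (fun (st : List (List (String × String)) × Bool) m =>
        let d := PySem.Dict.ofList m
        if d.get? "role" == some "system" then st
        else if !st.2 && (d.get? "role" == some "user") then
          (st.1 ++ [(d.insert "content" (sc ++ "\n" ++ (d.get? "content").getD "")).items], true)
        else (st.1 ++ [d.items], st.2)) = pvStepA sc from rfl]
    rw [pvLoopA_false]
    cases hf : conversation.findIdx? (fun m => (PySem.Dict.ofList m).get? "role" == some "user") with
    | none =>
      have hsyn : (PySem.Dict.ofList [("role", "user"), ("content", sc)]).get? "role" = some "user" := by
        simp [PySem.Dict.ofList, PySem.Dict.update, PySem.Dict.get?, PySem.Dict.insert,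
          PySem.Dict.empty, PySem.Dict.contains]
      have hitems : (PySem.Dict.ofList [("role", "user"), ("content", sc)]).items
          = [("role", "user"), ("content", sc)] := by
        simp [PySem.Dict.ofList, PySem.Dict.update, PySem.Dict.insert,
          PySem.Dict.empty, PySem.Dict.contains]
      simp [hsyn, hitems, pvKeep_map_filter]
    | some i =>
      have hrole : ((PySem.Dict.ofList (conversation.getD i [])).get? "role" == some "user") = true :=
        pvFindIdx?_getD hf
      have hrole' : ((PySem.Dict.ofList (conversation.getD i [])).insert "content"
            (sc ++ "\n" ++ (((PySem.Dict.ofList (conversation.getD i [])).get? "content").getD ""))).get? "role"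
          = some "user" := by
        rw [PySem.Dict.get?_insert_of_ne _ _ (by decide)]
        simpa using hrole
      simp only [List.getD] at hrole' ⊢
      simp only [List.filter_append, List.map_append, List.filter_cons]
      simp [hrole', pvMerged]
      rw [pvMapTake, pvMapDrop, pvKeep_map_filter, pvKeep_map_filter]
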